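-- pv_equiv track=rewrite | github.com/mmikolajewski/Euler_Hamilton | boys.py | hamilton_cycles
-- ===== SOURCE A (Python) =====
-- from collections import deque
--
-- def hamilton_cycles(graph):
--     n = len(graph)
--     cycles = []
--
--     def is_valid(v, path, pos):
--         # Sprawdzanie, czy wierzchołek v można dodać do ścieżki
--         if graph[path[pos - 1]][v] == 0:
--             return False
--
--         # Sprawdzanie, czy v był już dodany do ścieżki
--         if v in path:
--             return False
--
--         return True
--
--     def bfs_cycle(start):
--         q = deque([(start, [start])])
--
--         while q:
--             (v, path) = q.popleft()
--
--             # Jeśli ścieżka zawiera wszystkie wierzchołki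
--             if len(path) == n:
--                 # Sprawdzanie, czy istnieje krawędź między ostatnim a pierwszym wierzchołkiem
--                 if graph[path[-1]][path[0]] == 1:
--                     cycles.append(path)
--                 continue
--
--             for u in range(n):
--                 if is_valid(u, path, len(path)):
--                     new_path = path + [u]
--                     q.append((u, new_path))
--
--     for i in range(n):
--         bfs_cycle(i)
--
--     return cycles
-- ===== SOURCE B (Python) =====
-- def hamilton_cycles(graph):
--     n = len(graph)
--     cycles = []
--
--     def dfs(path):
--         if len(path) == n:
--             if graph[path[-1]][path[0]] == 1:
--                 cycles.append(path)
--             return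
--         for u in range(n):
--             if graph[path[-1]][u] != 0 and u not in path:
--                 dfs(path + [u])
--
--     for i in range(n):
--         dfs([i])
--
--     return cycles
-- ===== Notes on version B (the rewrite author's own statement) =====
-- stated objective: idiomatic
-- what changed: Replaces the FIFO-queue BFS over partial paths (which keeps every partial path of a level alive in memory) by a recursive DFS backtracking helper; visiting neighbours in increasing order makes the completed cycles appear in the same lexicographic order, so the output list is identical.
import Mathlib
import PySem

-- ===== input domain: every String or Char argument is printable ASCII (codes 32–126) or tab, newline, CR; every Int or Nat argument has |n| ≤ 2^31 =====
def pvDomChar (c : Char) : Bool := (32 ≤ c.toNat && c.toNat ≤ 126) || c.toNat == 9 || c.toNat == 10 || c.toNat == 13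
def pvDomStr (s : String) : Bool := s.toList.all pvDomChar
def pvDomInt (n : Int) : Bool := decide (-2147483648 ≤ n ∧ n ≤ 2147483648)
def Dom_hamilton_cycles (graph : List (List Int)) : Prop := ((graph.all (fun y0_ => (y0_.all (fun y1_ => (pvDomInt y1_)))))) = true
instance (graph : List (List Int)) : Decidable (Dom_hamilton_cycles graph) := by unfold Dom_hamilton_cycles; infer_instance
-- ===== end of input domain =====

-- B replaces A's FIFO-queue BFS over partial paths by a recursive DFS backtracking helper
-- (idiomatic; visiting neighbours in increasing order yields the same output list in the same order).

-- ===== PORT A =====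
-- is_valid(v, path, pos) of A
def pvIsValid (graph : List (List Int)) (v : Int) (path : List Int) (pos : Int) : Bool :=
  if PySem.List.pyGetD (PySem.List.pyGetD graph (PySem.List.pyGetD path (pos - 1) 0) []) v 0 == 0 then false
  else if path.contains v then false
  else true

-- termination measure for A's while-loop over the deque
def pvQMeasure (n : Nat) (q : List (Int × List Int)) : Nat :=
  (q.map (fun it => (n + 1) ^ (n - it.2.length))).sum

lemma pvQMeasure_append (n : Nat) (q r : List (Int × List Int)) :
    pvQMeasure n (q ++ r) = pvQMeasure n q + pvQMeasure n r := by
  simp [pvQMeasure]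

lemma pvQMeasure_cons (n : Nat) (it : Int × List Int) (q : List (Int × List Int)) :
    pvQMeasure n (it :: q) = (n + 1) ^ (n - it.2.length) + pvQMeasure n q := by
  simp [pvQMeasure]

lemma pvQMeasure_cons' (n : Nat) (v : Int) (p : List Int) (q : List (Int × List Int)) :
    pvQMeasure n ((v, p) :: q) = (n + 1) ^ (n - p.length) + pvQMeasure n q := by
  simp [pvQMeasure]

lemma pvQMeasure_le (n c : Nat) (q : List (Int × List Int))
    (h : ∀ it ∈ q, (n + 1) ^ (n - it.2.length) ≤ c) :
    pvQMeasure n q ≤ q.length * c := by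
  induction q with
  | nil => simp [pvQMeasure]
  | cons a q ih =>
    have h1 := h a (by simp)
    have h2 := ih (fun it hit => h it (List.mem_cons_of_mem _ hit))
    rw [pvQMeasure_cons, List.length_cons, Nat.succ_mul]
    omega

lemma pvQMeasure_extend (n len : Nat) (hlen : len < n) (items : List (Int × List Int))
    (hcnt : items.length ≤ n) (hit : ∀ it ∈ items, it.2.length = len + 1) :
    pvQMeasure n items < (n + 1) ^ (n - len) := by
  have h1 : pvQMeasure n items ≤ items.length * (n + 1) ^ (n - (len + 1)) :=
    pvQMeasure_le _ _ _ (fun it h => by rw [hit it h])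
  have hpow : (n + 1) ^ (n - len) = (n + 1) * (n + 1) ^ (n - (len + 1)) := by
    rw [← pow_succ']
    congr 1
    omega
  have hp : 0 < (n + 1) ^ (n - (len + 1)) := by positivity
  calc pvQMeasure n items ≤ n * (n + 1) ^ (n - (len + 1)) :=
        le_trans h1 (Nat.mul_le_mul_right _ hcnt)
    _ < (n + 1) * (n + 1) ^ (n - (len + 1)) := by
        exact (Nat.mul_lt_mul_right hp).mpr (by omega)
    _ = (n + 1) ^ (n - len) := hpow.symm

-- bfs_cycle's while-loop of A (deque as a list; popleft = head, append = ++)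
def pvBfsLoop (graph : List (List Int)) (n : Int) (q : List (Int × List Int))
    (cycles : List (List Int)) : List (List Int) :=
  match q with
  | [] => cycles
  | (_v, path) :: rest =>
    if (path.length : Int) = n then
      if PySem.List.pyGetD (PySem.List.pyGetD graph (PySem.List.pyGetD path (-1) 0) [])
          (PySem.List.pyGetD path 0 0) 0 == 1 then
        pvBfsLoop graph n rest (cycles ++ [path])
      else
        pvBfsLoop graph n rest cycles
    else if _h : (path.length : Int) < n then
      pvBfsLoop graph n
        (rest ++ (PySem.List.pyRange 0 n 1).filterMap
          (fun u => if pvIsValid graph u path (path.length : Int) then some (u, path ++ [u]) else none))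
        cycles
    else
      -- totality guard: a path longer than n is never enqueued
      pvBfsLoop graph n rest cycles
termination_by pvQMeasure n.toNat q
decreasing_by
  · rw [pvQMeasure_cons']
    have : 0 < (n.toNat + 1) ^ (n.toNat - path.length) := by positivity
    omega
  · rw [pvQMeasure_cons']
    have : 0 < (n.toNat + 1) ^ (n.toNat - path.length) := by positivity
    omega
  · rw [pvQMeasure_append, pvQMeasure_cons', Nat.add_comm (pvQMeasure n.toNat rest)]
    refine Nat.add_lt_add_right ?_ _
    refine pvQMeasure_extend n.toNat path.length (by omega) _ ?_ ?_
    · exact le_trans (List.length_filterMap_le _ _) (by rw [PySem.List.length_pyRange_one]; omega)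
    · intro it hit
      obtain ⟨u, _, hfu⟩ := List.mem_filterMap.mp hit
      split at hfu
      · cases hfu; simp
      · cases hfu
  · rw [pvQMeasure_cons']
    have : 0 < (n.toNat + 1) ^ (n.toNat - path.length) := by positivity
    omega

def hamilton_cycles (graph : List (List Int)) : List (List Int) :=
  let n : Int := (graph.length : Int)
  (PySem.List.pyRange 0 n 1).foldl (fun cycles i => pvBfsLoop graph n [(i, [i])] cycles) []

-- ===== PORT B =====
-- recursive DFS backtracking helper of B
def pvDfs (graph : List (List Int)) (n : Int) (path : List Int)
    (cycles : List (List Int)) : List (List Int) :=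
  if (path.length : Int) = n then
    if PySem.List.pyGetD (PySem.List.pyGetD graph (PySem.List.pyGetD path (-1) 0) [])
        (PySem.List.pyGetD path 0 0) 0 == 1 then cycles ++ [path] else cycles
  else if _h : (path.length : Int) < n then
    (PySem.List.pyRange 0 n 1).foldl
      (fun acc u =>
        if (PySem.List.pyGetD (PySem.List.pyGetD graph (PySem.List.pyGetD path (-1) 0) []) u 0 != 0)
            && !(path.contains u) then
          pvDfs graph n (path ++ [u]) acc
        else acc)
      cycles
  else
    -- totality guard: dfs is only ever called with len(path) ≤ n
    cycles
termination_by n.toNat - path.length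
decreasing_by simp; omega

def hamilton_cycles_alt (graph : List (List Int)) : List (List Int) :=
  let n : Int := (graph.length : Int)
  (PySem.List.pyRange 0 n 1).foldl (fun cycles i => pvDfs graph n [i] cycles) []

-- ===== PRECONDITION & SPEC =====
-- Pre_ excludes exactly the inputs where Python A raises IndexError: a row shorter than the
-- number of rows is indexed at some column < n on every run that reaches it.
def Pre_hamilton_cycles (graph : List (List Int)) : Prop :=
  ∀ row ∈ graph, graph.length ≤ row.length
instance (graph : List (List Int)) : Decidable (Pre_hamilton_cycles graph) := by
  unfold Pre_hamilton_cycles; infer_instance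

def pvWitness_hamilton_cycles : List (List Int) := [[0, 1], [1, 0]]

def Spec_hamilton_cycles (graph : List (List Int)) (out : List (List Int)) : Prop := out = hamilton_cycles_alt graph
instance (graph : List (List Int)) (out : List (List Int)) : Decidable (Spec_hamilton_cycles graph out) := by unfold Spec_hamilton_cycles; infer_instance

-- ===== CLAIM (what is proved, stated in full; the proofs are below) =====
def Claim_equal_hamilton_cycles : Prop := ∀ (graph : List (List Int)), Dom_hamilton_cycles graph → Pre_hamilton_cycles graph → Spec_hamilton_cycles graph (hamilton_cycles graph)

-- ===== LEMMAS AND PROOFS =====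

lemma pvItems_mem_len (n : Int) (path : List Int) (c : Int → Bool)
    {it : Int × List Int}
    (h : it ∈ (PySem.List.pyRange 0 n 1).filterMap
      (fun u => if c u then some (u, path ++ [u]) else none)) :
    it.2.length = path.length + 1 := by
  obtain ⟨u, _, hfu⟩ := List.mem_filterMap.mp h
  split at hfu
  · cases hfu; simp
  · cases hfu

-- the list of valid one-step extensions of a partial path (A's pushes / B's recursions)
def pvStep (graph : List (List Int)) (n : Int) (p : List Int) : List (List Int) :=
  (PySem.List.pyRange 0 n 1).filterMap
    (fun u => if pvIsValid graph u p (p.length : Int) then some (p ++ [u]) else none)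

lemma pvStep_len (graph : List (List Int)) (n : Int) (p : List Int) {q : List Int}
    (h : q ∈ pvStep graph n p) : q.length = p.length + 1 := by
  obtain ⟨u, _, hfu⟩ := List.mem_filterMap.mp h
  split at hfu
  · cases hfu; simp
  · cases hfu

-- the cycles emitted from one partial path, in DFS/lexicographic order
def pvComp (graph : List (List Int)) (n : Int) (p : List Int) : List (List Int) :=
  if (p.length : Int) = n then
    if PySem.List.pyGetD (PySem.List.pyGetD graph (PySem.List.pyGetD p (-1) 0) [])
        (PySem.List.pyGetD p 0 0) 0 == 1 then [p] else []
  else if _h : (p.length : Int) < n then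
    (pvStep graph n p).attach.flatMap (fun q => pvComp graph n q.1)
  else []
termination_by n.toNat - p.length
decreasing_by
  have := pvStep_len graph n p q.2
  simp [this]
  omega

lemma pvComp_close (graph : List (List Int)) (n : Int) (p : List Int)
    (h : (p.length : Int) = n) :
    pvComp graph n p =
      if PySem.List.pyGetD (PySem.List.pyGetD graph (PySem.List.pyGetD p (-1) 0) [])
          (PySem.List.pyGetD p 0 0) 0 == 1 then [p] else [] := by
  rw [pvComp]; simp [h]

lemma pvComp_step (graph : List (List Int)) (n : Int) (p : List Int)
    (h1 : ¬ (p.length : Int) = n) (h2 : (p.length : Int) < n) :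
    pvComp graph n p = (pvStep graph n p).flatMap (pvComp graph n) := by
  rw [pvComp]
  simp [h1, h2, List.flatMap_subtype, List.unattach_attach]

lemma pvComp_big (graph : List (List Int)) (n : Int) (p : List Int)
    (h1 : ¬ (p.length : Int) = n) (h2 : ¬ (p.length : Int) < n) :
    pvComp graph n p = [] := by
  rw [pvComp]; simp [h1, h2]

-- a list of same-length short paths expands one level without changing the emitted cycles
lemma pvComp_flatMap_step (graph : List (List Int)) (n : Int) (ps : List (List Int)) (L : Nat)
    (hlen : ∀ p ∈ ps, p.length = L) (h1 : ¬ (L : Int) = n) (h2 : (L : Int) < n) :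
    (ps.flatMap (pvStep graph n)).flatMap (pvComp graph n) = ps.flatMap (pvComp graph n) := by
  rw [List.flatMap_assoc]
  apply List.flatMap_congr
  intro p hp
  exact (pvComp_step graph n p (by rw [hlen p hp]; exact h1) (by rw [hlen p hp]; exact h2)).symm

-- B's guard and A's is_valid coincide
lemma pvGetLast_idx (p : List Int) (d : Int) :
    PySem.List.pyGetD p ((p.length : Int) - 1) d = PySem.List.pyGetD p (-1) d := by
  match p with
  | [] => norm_num
  | a :: l =>
    rw [PySem.List.pyGetD_neg_one (a :: l) d (by simp),
        PySem.List.pyGetD_eq_getElem (a :: l) d (by simp) (by simp)]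
    rw [List.getLast_eq_getElem]
    congr 1
    simp

lemma pvCond_eq (graph : List (List Int)) (p : List Int) (u : Int) :
    ((PySem.List.pyGetD (PySem.List.pyGetD graph (PySem.List.pyGetD p (-1) 0) []) u 0 != 0)
      && !(p.contains u)) = pvIsValid graph u p (p.length : Int) := by
  unfold pvIsValid
  rw [pvGetLast_idx]
  cases h1 : PySem.List.pyGetD (PySem.List.pyGetD graph (PySem.List.pyGetD p (-1) 0) []) u 0 == 0 <;>
    cases h2 : p.contains u <;> simp_all [bne]

-- flatMap through a guarded filterMap
lemma pvFlatMap_filterMap {α β γ : Type} (l : List α) (c : α → Bool) (m : α → β)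
    (f : β → List γ) :
    ((l.filterMap (fun u => if c u then some (m u) else none)).flatMap f)
      = l.flatMap (fun u => if c u then f (m u) else []) := by
  induction l with
  | nil => rfl
  | cons a l ih =>
    by_cases h : c a = true <;> simp [h, ih]

-- the second components of the pairs A pushes are exactly pvStep
lemma pvMapSnd_items (l : List Int) (c : Int → Bool) (p : List Int) :
    (l.filterMap (fun u => if c u then some (u, p ++ [u]) else none)).map (·.2)
      = l.filterMap (fun u => if c u then some (p ++ [u]) else none) := by
  induction l with
  | nil => rfl
  | cons a l ih =>
    by_cases h : c a = true <;> simp [h, ih]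

-- B's dfs accumulates exactly pvComp
lemma pvDfs_eq_comp (graph : List (List Int)) (n : Int) :
    ∀ (d : Nat) (p : List Int) (cyc : List (List Int)), n.toNat - p.length ≤ d →
      pvDfs graph n p cyc = cyc ++ pvComp graph n p := by
  intro d
  induction d with
  | zero =>
    intro p cyc hd
    by_cases hEq : (p.length : Int) = n
    · rw [pvDfs, pvComp_close graph n p hEq]
      simp only [hEq, if_true]
      split <;> simp
    · have hnlt : ¬ (p.length : Int) < n := by omega
      rw [pvDfs, pvComp_big graph n p hEq hnlt]
      simp [hEq, hnlt]
  | succ d ih =>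
    intro p cyc hd
    by_cases hEq : (p.length : Int) = n
    · rw [pvDfs, pvComp_close graph n p hEq]
      simp only [hEq, if_true]
      split <;> simp
    · by_cases hLt : (p.length : Int) < n
      · rw [pvDfs]
        simp only [hEq, hLt, if_false, dif_pos]
        have hbody : ∀ (acc : List (List Int)) (u : Int), u ∈ PySem.List.pyRange 0 n 1 →
            (if (PySem.List.pyGetD (PySem.List.pyGetD graph (PySem.List.pyGetD p (-1) 0) []) u 0 != 0)
                && !(p.contains u) then pvDfs graph n (p ++ [u]) acc else acc)
              = acc ++ (if pvIsValid graph u p (p.length : Int)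
                  then pvComp graph n (p ++ [u]) else []) := by
          intro acc u _
          rw [pvCond_eq]
          by_cases hc : pvIsValid graph u p (p.length : Int) = true
          · simp only [hc, if_true]
            exact ih (p ++ [u]) acc (by simp; omega)
          · simp [hc]
        rw [PySem.List.foldl_congr_mem (PySem.List.pyRange 0 n 1) _
              (fun acc u => acc ++ (if pvIsValid graph u p (p.length : Int)
                then pvComp graph n (p ++ [u]) else [])) cyc hbody,
            PySem.List.foldl_append_eq_flatMap]
        rw [show (PySem.List.pyRange 0 n 1).flatMap
              (fun u => if pvIsValid graph u p (p.length : Int)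
                then pvComp graph n (p ++ [u]) else [])
            = (pvStep graph n p).flatMap (pvComp graph n) from
          (pvFlatMap_filterMap _ _ _ _).symm]
        rw [← pvComp_step graph n p hEq hLt]
      · rw [pvDfs, pvComp_big graph n p hEq hLt]
        simp [hEq, hLt]

lemma pvBfsLoop_nil (graph : List (List Int)) (n : Int) (cycles : List (List Int)) :
    pvBfsLoop graph n [] cycles = cycles := by
  rw [pvBfsLoop.eq_def]

lemma pvBfsLoop_cons (graph : List (List Int)) (n : Int) (v : Int) (path : List Int)
    (rest : List (Int × List Int)) (cycles : List (List Int)) :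
    pvBfsLoop graph n ((v, path) :: rest) cycles =
      if (path.length : Int) = n then
        if PySem.List.pyGetD (PySem.List.pyGetD graph (PySem.List.pyGetD path (-1) 0) [])
            (PySem.List.pyGetD path 0 0) 0 == 1 then
          pvBfsLoop graph n rest (cycles ++ [path])
        else
          pvBfsLoop graph n rest cycles
      else if (path.length : Int) < n then
        pvBfsLoop graph n
          (rest ++ (PySem.List.pyRange 0 n 1).filterMap
            (fun u => if pvIsValid graph u path (path.length : Int) then some (u, path ++ [u]) else none))
          cycles
      else
        pvBfsLoop graph n rest cycles := by
  rw [pvBfsLoop.eq_def]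
  rfl

-- A's queue invariant: processing a level-L suffix R followed by the already-pushed
-- level-(L+1) prefix C emits the cycles in DFS order
lemma pvBfs_inv (graph : List (List Int)) (n : Int) :
    ∀ (k : Nat) (L : Nat) (R C : List (Int × List Int)) (cyc : List (List Int)),
      pvQMeasure n.toNat (R ++ C) + (n.toNat - L) ≤ k →
      1 ≤ L → (L : Int) ≤ n →
      (∀ it ∈ R, it.2.length = L) →
      (∀ it ∈ C, it.2.length = L + 1) →
      ((L : Int) = n → C = []) →
      pvBfsLoop graph n (R ++ C) cyc =
        cyc ++ (if (L : Int) = n then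
            (R.map (·.2)).flatMap (pvComp graph n) ++ (C.map (·.2)).flatMap (pvComp graph n)
          else
            ((C.map (·.2)) ++ (R.map (·.2)).flatMap (pvStep graph n)).flatMap (pvComp graph n)) := by
  intro k
  induction k with
  | zero =>
    intro L R C cyc hk h1L hLn hR hC hCn
    match R, C with
    | [], [] => rw [List.nil_append, pvBfsLoop_nil]; split <;> simp
    | [], (v, p) :: C' =>
      exfalso
      rw [List.nil_append, pvQMeasure_cons'] at hk
      have : 0 < (n.toNat + 1) ^ (n.toNat - p.length) := by positivity
      omega
    | (v, p) :: R', C =>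
      exfalso
      rw [List.cons_append, pvQMeasure_cons'] at hk
      have : 0 < (n.toNat + 1) ^ (n.toNat - p.length) := by positivity
      omega
  | succ k ih =>
    intro L R C cyc hk h1L hLn hR hC hCn
    match R with
    | [] =>
      match C with
      | [] => rw [List.nil_append, pvBfsLoop_nil]; split <;> simp
      | c :: C' =>
        have hLne : ¬ (L : Int) = n := fun h => List.cons_ne_nil c C' (hCn h)
        have hLlt : (L : Int) < n := lt_of_le_of_ne hLn hLne
        have hLn' : L < n.toNat := by omega
        have key := ih (L + 1) (c :: C') [] cyc
          (by rw [List.append_nil]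
              rw [List.nil_append] at hk
              omega)
          (by omega)
          (by push_cast; omega)
          (fun it hit => hC it hit)
          (by intro it hit; cases hit)
          (fun _ => rfl)
        rw [List.append_nil] at key
        rw [List.nil_append, key]
        simp only [hLne, if_false, List.map_nil, List.nil_append, List.flatMap_nil,
          List.append_nil]
        by_cases hL1 : ((L : Int) + 1) = n
        · have : ((L + 1 : Nat) : Int) = n := by push_cast; omega
          simp [this]
        · have : ¬ ((L + 1 : Nat) : Int) = n := by push_cast; omega
          simp only [this, if_false]
          rw [pvComp_flatMap_step graph n ((c :: C').map (·.2)) (L + 1)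
            (by intro q hq
                obtain ⟨it, hit, rfl⟩ := List.mem_map.mp hq
                exact hC it hit)
            (by push_cast; omega)
            (by push_cast; omega)]
    | (v, p) :: R' =>
      have hp : p.length = L := hR (v, p) (List.mem_cons_self)
      subst hp
      by_cases hEq : (p.length : Int) = n
      · -- emission level: every popped path has full length
        have hCnil : C = [] := hCn hEq
        subst hCnil
        have hmeas : pvQMeasure n.toNat (R' ++ ([] : List (Int × List Int))) + (n.toNat - p.length) ≤ k := by
          rw [List.cons_append, pvQMeasure_cons'] at hk
          have : 0 < (n.toNat + 1) ^ (n.toNat - p.length) := by positivity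
          omega
        rw [List.cons_append, pvBfsLoop_cons]
        simp only [hEq, if_true]
        split
        next hcl =>
          rw [ih p.length R' [] (cyc ++ [p]) hmeas h1L hLn
              (fun it hit => hR it (List.mem_cons_of_mem _ hit)) hC hCn]
          simp [hEq, pvComp_close graph n p hEq, hcl]
        next hcl =>
          rw [ih p.length R' [] cyc hmeas h1L hLn
              (fun it hit => hR it (List.mem_cons_of_mem _ hit)) hC hCn]
          simp [hEq, pvComp_close graph n p hEq, hcl]
      · -- expansion level: the popped path is extended and its children appended
        have hplt : (p.length : Int) < n := lt_of_le_of_ne hLn hEq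
        rw [List.cons_append, pvBfsLoop_cons]
        simp only [hEq, if_false, hplt, if_true]
        rw [List.cons_append] at hk
        rw [List.append_assoc]
        have hitems : ∀ it ∈ (PySem.List.pyRange 0 n 1).filterMap
            (fun u => if pvIsValid graph u p (p.length : Int) then some (u, p ++ [u]) else none),
            it.2.length = p.length + 1 := by
          intro it hit
          have := pvItems_mem_len n p (fun u => pvIsValid graph u p (p.length : Int)) hit
          omega
        have hmeas : pvQMeasure n.toNat
            (R' ++ (C ++ (PySem.List.pyRange 0 n 1).filterMap
              (fun u => if pvIsValid graph u p (p.length : Int) then some (u, p ++ [u]) else none)))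
            + (n.toNat - p.length) ≤ k := by
          rw [pvQMeasure_append, pvQMeasure_append]
          rw [pvQMeasure_cons', pvQMeasure_append] at hk
          have hlt := pvQMeasure_extend n.toNat p.length (by omega) _
            (le_trans (List.length_filterMap_le _ _) (by rw [PySem.List.length_pyRange_one]; omega))
            (fun it hit => pvItems_mem_len n p (fun u => pvIsValid graph u p (p.length : Int)) hit)
          beta_reduce at hlt
          omega
        rw [ih p.length R' (C ++ _) cyc hmeas h1L hLn
            (fun it hit => hR it (List.mem_cons_of_mem _ hit))
            (by intro it hit
                rcases List.mem_append.mp hit with h | h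
                · exact hC it h
                · exact hitems it h)
            (fun h => absurd h hEq)]
        simp only [hEq, if_false]
        rw [List.map_append, pvMapSnd_items]
        simp only [List.map_cons, List.flatMap_cons]
        rw [List.append_assoc]
        rfl

lemma pvBfs_single (graph : List (List Int)) (n : Int) (i : Int) (cyc : List (List Int))
    (hn : 1 ≤ n) :
    pvBfsLoop graph n [(i, [i])] cyc = cyc ++ pvComp graph n [i] := by
  have key := pvBfs_inv graph n (pvQMeasure n.toNat [(i, [i])] + n.toNat) 1 [(i, [i])] [] cyc
    (by rw [List.append_nil]; omega)
    (le_refl 1)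
    (by exact_mod_cast hn)
    (by intro it hit
        rcases List.mem_singleton.mp hit with rfl
        rfl)
    (by intro it hit; cases hit)
    (fun _ => rfl)
  rw [List.append_nil] at key
  rw [key]
  by_cases h1 : ((1 : Nat) : Int) = n
  · simp [h1]
  · have hlt : ((1 : Nat) : Int) < n := lt_of_le_of_ne (by exact_mod_cast hn) h1
    simp only [h1, if_false, List.map_nil, List.nil_append, List.map_cons, List.flatMap_cons,
      List.flatMap_nil, List.append_nil]
    rw [← pvComp_step graph n [i] (by simpa using h1) (by simpa using hlt)]

-- ===== VERDICT (by name: the statement is the Claim_ definition above) =====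
theorem hamilton_cycles_spec : Claim_equal_hamilton_cycles := by
  intro graph _ _
  unfold Spec_hamilton_cycles hamilton_cycles hamilton_cycles_alt
  apply PySem.List.foldl_congr_mem
  intro cyc i hi
  have hn : 1 ≤ (graph.length : Int) := by
    have := (PySem.List.mem_pyRange_one.mp hi)
    omega
  rw [pvBfs_single graph _ i cyc hn, pvDfs_eq_comp graph _ (graph.length.succ) [i] cyc (by simp; omega)]
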